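-- pv_equiv track=rewrite | github.com/rhpvorderman/sequali | src/sequali/report_modules.py | equidistant_ranges
-- ===== SOURCE A (Python) =====
-- from typing import (Any, Dict, Iterable, Iterator, List, Optional, Sequence,
--                     Set, Tuple, Type)
--
-- def equidistant_ranges(length: int, parts: int) -> Iterator[Tuple[int, int]]:
--     size = length // parts
--     remainder = length % parts
--     small_parts = parts - remainder
--     start = 0
--     for i in range(parts):
--         part_size = size if i < small_parts else size + 1
--         if part_size == 0:
--             continue
--         stop = start + part_size
--         yield start, stop
--         start = stop
-- ===== SOURCE B (Python) =====
-- def equidistant_ranges(length, parts):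
--     size = length // parts
--     remainder = length % parts
--     small_parts = parts - remainder
--
--     def boundary(i):
--         return i * size + max(0, i - small_parts)
--
--     for i in range(parts):
--         b0, b1 = boundary(i), boundary(i + 1)
--         if b0 != b1:
--             yield b0, b1
-- ===== Notes on version B (the rewrite author's own statement) =====
-- stated objective: alternative
-- what changed: Replaces A's running-start accumulation with a closed-form cumulative boundary function boundary(i)=i*size+max(0,i-small_parts), yielding (boundary(i), boundary(i+1)) whenever the two boundaries differ.
import Mathlib
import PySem

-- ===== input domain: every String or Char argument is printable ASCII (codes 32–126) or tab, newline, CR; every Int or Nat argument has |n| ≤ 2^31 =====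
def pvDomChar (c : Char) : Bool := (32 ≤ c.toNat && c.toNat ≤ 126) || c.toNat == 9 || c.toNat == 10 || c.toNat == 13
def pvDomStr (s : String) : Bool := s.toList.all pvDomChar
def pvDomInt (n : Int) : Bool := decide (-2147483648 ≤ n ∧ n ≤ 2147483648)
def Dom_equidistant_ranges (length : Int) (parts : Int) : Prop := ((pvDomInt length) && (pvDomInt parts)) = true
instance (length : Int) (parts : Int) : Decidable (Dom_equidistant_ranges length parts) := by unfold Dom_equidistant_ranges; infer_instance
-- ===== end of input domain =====

-- B replaces the running-start accumulation with a closed-form boundary function (alternative decomposition, same cost).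

-- ===== PORT A =====
def equidistant_ranges (length : Int) (parts : Int) : List (Int × Int) :=
  let size := PySem.Int.floordiv length parts
  let remainder := PySem.Int.mod length parts
  let small_parts := parts - remainder
  ((PySem.List.pyRange 0 parts 1).foldl
    (fun (st : Int × List (Int × Int)) i =>
      let part_size := if i < small_parts then size else size + 1
      if part_size = 0 then st
      else (st.1 + part_size, st.2 ++ [(st.1, st.1 + part_size)]))
    (0, [])).2

-- ===== PORT B =====
def equidistant_ranges_alt (length : Int) (parts : Int) : List (Int × Int) :=
  let size := PySem.Int.floordiv length parts
  let remainder := PySem.Int.mod length parts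
  let small_parts := parts - remainder
  let boundary : Int → Int := fun i => i * size + max 0 (i - small_parts)
  (PySem.List.pyRange 0 parts 1).foldl
    (fun acc i => if boundary i ≠ boundary (i + 1) then acc ++ [(boundary i, boundary (i + 1))] else acc)
    []

-- ===== PRECONDITION & SPEC =====
-- Python A raises ZeroDivisionError when parts == 0 (so does B); excluded.
def Pre_equidistant_ranges (length : Int) (parts : Int) : Prop := parts ≠ 0
instance (length : Int) (parts : Int) : Decidable (Pre_equidistant_ranges length parts) := by unfold Pre_equidistant_ranges; infer_instance
def pvWitness_equidistant_ranges : Int × Int := (10, 3)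

def Spec_equidistant_ranges (length : Int) (parts : Int) (out : List (Int × Int)) : Prop := out = equidistant_ranges_alt length parts
instance (length : Int) (parts : Int) (out : List (Int × Int)) : Decidable (Spec_equidistant_ranges length parts out) := by unfold Spec_equidistant_ranges; infer_instance

-- ===== CLAIM (what is proved, stated in full; the proofs are below) =====
def Claim_equal_equidistant_ranges : Prop := ∀ (length : Int) (parts : Int), Dom_equidistant_ranges length parts → Pre_equidistant_ranges length parts → Spec_equidistant_ranges length parts (equidistant_ranges length parts)

-- ===== LEMMAS AND PROOFS =====

-- A's loop, started at the closed-form boundary of `a`, produces the filter-map B computes.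
theorem pv_loop_eq (size sp b : Int) (a : Int) (acc : List (Int × Int)) :
    ((PySem.List.pyRange a b 1).foldl
      (fun (st : Int × List (Int × Int)) i =>
        let part_size := if i < sp then size else size + 1
        if part_size = 0 then st
        else (st.1 + part_size, st.2 ++ [(st.1, st.1 + part_size)]))
      (a * size + max 0 (a - sp), acc)).2
    = acc ++ ((PySem.List.pyRange a b 1).filter
        (fun i => decide ((i * size + max 0 (i - sp)) ≠ ((i+1) * size + max 0 (i+1 - sp))))).map
        (fun i => (i * size + max 0 (i - sp), (i+1) * size + max 0 (i+1 - sp))) := by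
  by_cases h : a < b
  · rw [PySem.List.pyRange_one_cons h]
    simp only [List.foldl_cons, List.filter_cons]
    have hstep : (a+1) * size + max 0 (a+1 - sp)
        = (a * size + max 0 (a - sp)) + (if a < sp then size else size + 1) := by
      by_cases hs : a < sp
      · simp only [if_pos hs]
        have h1 : max 0 (a - sp) = 0 := by omega
        have h2 : max 0 (a + 1 - sp) = 0 := by omega
        rw [h1, h2]; ring
      · simp only [if_neg hs]
        have h1 : max 0 (a - sp) = a - sp := by omega
        have h2 : max 0 (a + 1 - sp) = a + 1 - sp := by omega
        rw [h1, h2]; ring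
    by_cases hz : (if a < sp then size else size + 1) = 0
    · have heq : (a+1) * size + max 0 (a+1 - sp) = a * size + max 0 (a - sp) := by
        rw [hstep, hz]; ring
      simp only [hz, if_pos, heq]
      rw [show (decide ¬ a * size + max 0 (a - sp) = a * size + max 0 (a - sp)) = false by simp]
      simp only [Bool.false_eq_true, if_false]
      have := pv_loop_eq size sp b (a+1) acc
      rw [heq] at this
      exact this
    · have hne : (a * size + max 0 (a - sp)) ≠ ((a+1) * size + max 0 (a+1 - sp)) := by
        rw [hstep]; intro hc; apply hz; omega
      simp only [hz, if_false]
      rw [show (decide ¬ a * size + max 0 (a - sp) = (a+1) * size + max 0 (a+1 - sp)) = true by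
        simp [hne]]
      simp only [if_pos]
      have := pv_loop_eq size sp b (a+1) (acc ++ [(a * size + max 0 (a - sp), a * size + max 0 (a - sp) + (if a < sp then size else size + 1))])
      rw [hstep] at this
      rw [this]
      simp [hstep]
  · rw [PySem.List.pyRange_one_eq_nil (by omega)]
    simp
termination_by (b - a).toNat
decreasing_by all_goals omega

-- ===== VERDICT (by name: the statement is the Claim_ definition above) =====
theorem equidistant_ranges_spec : Claim_equal_equidistant_ranges := by
  intro length parts _ hpre
  unfold Spec_equidistant_ranges equidistant_ranges equidistant_ranges_alt
  set size := PySem.Int.floordiv length parts with hsize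
  set rem := PySem.Int.mod length parts with hrem
  set sp := parts - rem with hsp
  by_cases hp : 0 < parts
  · have hb0 : (0 : Int) * size + max 0 (0 - sp) = 0 := by
      have h1 := PySem.Int.mod_nonneg (a := length) (b := parts) hp
      have h2 := PySem.Int.mod_lt (a := length) (b := parts) hp
      simp only [hsp]
      omega
    have := pv_loop_eq size sp parts 0 []
    rw [hb0] at this
    rw [this]
    rw [PySem.List.foldl_append_ite]
  · rw [PySem.List.pyRange_one_eq_nil (by omega)]
    simp
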